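-- pv_equiv track=rewrite | github.com/EkoSoftware/Projects | t9encoding.py | my_encode
-- ===== SOURCE A (Python) =====
-- def my_encode(string):
--     string = string.lower()
--     tempstring = ""
--
--     def get_key(char):
--         for key, value in t9_alphabet.items():
--             if value == char:
--                 return key
--         return None
--
--     t9_alphabet = {
--         '1': '.', '11': ',', '111': '!', '1111':'?', '11111': "'",
--         '2': 'a', '22': 'b', '222': 'c',
--         '3': 'd', '33': 'e', '333': 'f',
--         '4': 'g', '44': 'h', '444': 'i',
--         '5': 'j', '55': 'k', '555': 'l',
--         '6': 'm', '66': 'n', '666': 'o',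
--         '7': 'p', '77': 'q', '777': 'r', '7777': 's',
--         '8': 't', '88': 'u', '888': 'v',
--         '9': 'w', '99': 'x', '999': 'y', '9999': 'z',
--         '0': ' '}
--
--     for char in string:
--         tempstring += get_key(char)+'|'
--     return tempstring
-- ===== SOURCE B (Python) =====
-- _PUNCT = ".,!?'"
--
-- def _key(c):
--     if c == ' ':
--         return '0'
--     if c in _PUNCT:
--         return '1' * (_PUNCT.index(c) + 1)
--     i = ord(c) - ord('a')
--     if 0 <= i < 26:
--         if i < 15:
--             return chr(ord('2') + i // 3) * (i % 3 + 1)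
--         if i < 19:
--             return '7' * (i - 14)
--         if i < 22:
--             return '8' * (i - 18)
--         return '9' * (i - 21)
--     return None
--
-- def my_encode(string):
--     return ''.join(_key(c) + '|' for c in string.lower())
-- ===== Notes on version B (the rewrite author's own statement) =====
-- stated objective: alternative
-- what changed: B drops the T9 table entirely and computes each key arithmetically from the character code (group digit = 2 + i//3 for a..o, fixed digits for the 4-letter groups, punctuation index for '1' repeats), instead of A's reverse linear scan over the dict per character.
import Mathlib
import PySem

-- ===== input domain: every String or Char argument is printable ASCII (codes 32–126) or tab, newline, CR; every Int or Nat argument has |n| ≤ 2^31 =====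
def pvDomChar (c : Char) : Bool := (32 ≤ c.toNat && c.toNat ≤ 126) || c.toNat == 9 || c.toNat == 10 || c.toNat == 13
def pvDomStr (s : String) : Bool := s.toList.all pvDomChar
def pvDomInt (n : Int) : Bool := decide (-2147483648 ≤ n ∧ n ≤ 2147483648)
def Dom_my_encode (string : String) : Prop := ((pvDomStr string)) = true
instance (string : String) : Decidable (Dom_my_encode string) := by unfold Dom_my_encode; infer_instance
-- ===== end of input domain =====

-- B replaces A's table and per-character reverse scan by closed-form arithmetic on the
-- character code (objective: alternative). Equivalence is about the return value on
-- Pre_ (where A returns; elsewhere the Python A raises TypeError, and so does B).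

-- ===== PORT A =====
-- A's t9_alphabet dict: keys are key-sequences, values the single characters.
def pvT9 : List (String × Char) :=
  [("1", '.'), ("11", ','), ("111", '!'), ("1111", '?'), ("11111", '\''),
   ("2", 'a'), ("22", 'b'), ("222", 'c'),
   ("3", 'd'), ("33", 'e'), ("333", 'f'),
   ("4", 'g'), ("44", 'h'), ("444", 'i'),
   ("5", 'j'), ("55", 'k'), ("555", 'l'),
   ("6", 'm'), ("66", 'n'), ("666", 'o'),
   ("7", 'p'), ("77", 'q'), ("777", 'r'), ("7777", 's'),
   ("8", 't'), ("88", 'u'), ("888", 'v'),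
   ("9", 'w'), ("99", 'x'), ("999", 'y'), ("9999", 'z'),
   ("0", ' ')]

-- A's get_key: scan the items in order, return the first key whose value equals char.
def pvGetKeyA (items : List (String × Char)) (c : Char) : Option String :=
  match items with
  | [] => none
  | (k, v) :: rest => if v == c then some k else pvGetKeyA rest c

-- A's loop: tempstring += get_key(char) + '|'.  get_key = None means Python raises
-- TypeError (None + '|'), excluded by Pre_; the .getD [] there is only a totality guard.
def my_encode (string : String) : String :=
  String.mk (((PySem.Str.lower string).toList).foldl
    (fun t c => t ++ (((pvGetKeyA pvT9 c).map String.toList).getD [] ++ ['|'])) [])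

-- ===== PORT B =====
-- B's punctuation string ".,!?'"
def pvPunct : List Char := ['.', ',', '!', '?', '\'']

-- B's _key: arithmetic on the character code, no table.
def pvKeyB (c : Char) : Option (List Char) :=
  if c = ' ' then some ['0']
  else
    match PySem.List.index? pvPunct c with
    | some j => some (List.replicate (j + 1) '1')
    | none =>
      let i : Int := (c.toNat : Int) - 97        -- ord(c) - ord('a')
      if 0 ≤ i ∧ i < 26 then
        let j := i.toNat
        if j < 15 then some (List.replicate (j % 3 + 1) (Char.ofNat (50 + j / 3)))
        else if j < 19 then some (List.replicate (j - 14) '7')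
        else if j < 22 then some (List.replicate (j - 18) '8')
        else some (List.replicate (j - 21) '9')
      else none

-- B: ''.join(_key(c) + '|' for c in string.lower()).  _key = None means Python raises
-- TypeError, excluded by Pre_; .getD [] is only a totality guard.
def my_encode_alt (string : String) : String :=
  String.mk (PySem.Chars.join []
    ((PySem.Chars.lower string.toList).map
      (fun c => ((pvKeyB c).getD []) ++ ['|'])))

-- ===== PRECONDITION & SPEC =====
-- The characters A's table maps (the lowered string may only contain these);
-- on any other character the Python A raises TypeError (None + '|'), and so does B.
def pvMapped : List Char := pvT9.map (·.2)

def Pre_my_encode (string : String) : Prop :=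
  ((PySem.Chars.lower string.toList).all (fun c => pvMapped.contains c)) = true
instance (string : String) : Decidable (Pre_my_encode string) := by unfold Pre_my_encode; infer_instance

def pvWitness_my_encode : String := "hi"

def Spec_my_encode (string : String) (out : String) : Prop := out = my_encode_alt string
instance (string : String) (out : String) : Decidable (Spec_my_encode string out) := by unfold Spec_my_encode; infer_instance

-- ===== CLAIM (what is proved, stated in full; the proofs are below) =====
def Claim_equal_my_encode : Prop := ∀ (string : String), Dom_my_encode string → Pre_my_encode string → Spec_my_encode string (my_encode string)

-- ===== LEMMAS AND PROOFS =====

-- On every mapped character A's linear scan and B's arithmetic key agree.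
theorem pvGetKey_eq_keyB (c : Char) (hc : c ∈ pvMapped) :
    (pvGetKeyA pvT9 c).map String.toList = pvKeyB c := by
  fin_cases hc <;> decide

theorem pvIntercalate_nil (pss : List (List Char)) : [].intercalate pss = pss.flatten := by
  induction pss with
  | nil => rfl
  | cons p ps ih => cases ps <;> simp_all [List.intercalate, List.intersperse]

-- A's accumulator loop equals acc ++ flatten of the per-character pieces.
theorem pvLoop_eq (f : Char → List Char) (l : List Char) (acc : List Char) :
    l.foldl (fun t c => t ++ f c) acc = acc ++ (l.map f).flatten := by
  induction l generalizing acc with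
  | nil => simp
  | cons c cs ih => simp [List.foldl, ih]

-- ===== VERDICT (by name: the statement is the Claim_ definition above) =====
theorem my_encode_spec : Claim_equal_my_encode := by
  intro s _ hpre
  have hpre' : ∀ c ∈ (PySem.Chars.lower s.toList), c ∈ pvMapped := by
    simpa [Pre_my_encode, List.all_eq_true] using hpre
  unfold Spec_my_encode my_encode my_encode_alt
  rw [PySem.Str.toList_lower]
  rw [pvLoop_eq, show PySem.Chars.join ([] : List Char) = [].intercalate from rfl,
      pvIntercalate_nil]
  congr 1
  apply congrArg List.flatten
  apply List.map_congr_left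
  intro c hc
  rw [pvGetKey_eq_keyB c (hpre' c hc)]
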